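-- pv_equiv track=rewrite | github.com/g8e-ai/g8e | components/g8ee/app/utils/whitelist_validator.py | _is_safe_value
-- ===== SOURCE A (Python) =====
-- def _is_safe_value(value: str) -> bool:
--     """Check if a value contains only safe characters."""
--     if not value:
--         return False
--
--     if value == "-" or value == "--":
--         return False
--
--     unsafe_chars = [";", "&", "`", "$", "(", ")", "{", "}", "<", ">", "\\", "\n", "\r", "\t"]
--     for char in unsafe_chars:
--         if char in value:
--             return False
--
--     return True
-- ===== SOURCE B (Python) =====
-- _UNSAFE = frozenset(";&`$(){}<>\\\n\r\t")
--
-- def _is_safe_value(value: str) -> bool: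
--     """Check if a value contains only safe characters."""
--     if not value:
--         return False
--     if value == "-" or value == "--":
--         return False
--     return not any(c in _UNSAFE for c in value)
-- ===== Notes on version B (the rewrite author's own statement) =====
-- stated objective: idiomatic
-- what changed: Replaces the loop over the 14-element blacklist (one substring scan of value per unsafe char) with a single pass over value's characters testing membership in a frozenset of unsafe characters.
import Mathlib
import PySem

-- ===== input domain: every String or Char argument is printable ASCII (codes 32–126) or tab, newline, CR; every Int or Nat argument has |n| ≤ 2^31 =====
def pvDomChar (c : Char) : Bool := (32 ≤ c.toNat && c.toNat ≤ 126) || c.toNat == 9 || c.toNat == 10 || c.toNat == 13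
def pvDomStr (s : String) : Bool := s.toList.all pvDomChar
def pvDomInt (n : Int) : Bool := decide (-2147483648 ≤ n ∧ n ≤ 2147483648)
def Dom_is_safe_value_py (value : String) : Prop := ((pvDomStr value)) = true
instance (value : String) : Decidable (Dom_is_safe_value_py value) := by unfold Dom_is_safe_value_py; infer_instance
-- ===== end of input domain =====

-- B replaces A's loop over the 14-element blacklist (one substring scan per unsafe char)
-- with a single pass over the value testing each character against a frozenset (objective: idiomatic).

-- ===== PORT A =====
def blockedStrsA : List String :=
  [";", "&", "`", "$", "(", ")", "{", "}", "<", ">", "\\", "\n", "\r", "\t"]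

-- the 'for char in unsafe_chars: if char in value: return False' loop
def checkA : List String → String → Bool
  | [], _ => true
  | c :: rest, v => if PySem.Str.isIn c v then false else checkA rest v

def is_safe_value_py (value : String) : Bool :=
  if value = "" then false
  else if value = "-" ∨ value = "--" then false
  else checkA blockedStrsA value

-- ===== PORT B =====
def blockedSetB : PySem.Set Char := PySem.Set.ofList ";&`$(){}<>\\\n\r\t".toList

def is_safe_value_py_alt (value : String) : Bool :=
  if value = "" then false
  else if value = "-" ∨ value = "--" then false
  else !(value.toList.any fun c => PySem.Set.contains blockedSetB c)

-- ===== PRECONDITION & SPEC =====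
def Spec_is_safe_value_py (value : String) (out : Bool) : Prop := out = is_safe_value_py_alt value
instance (value : String) (out : Bool) : Decidable (Spec_is_safe_value_py value out) := by unfold Spec_is_safe_value_py; infer_instance

-- ===== CLAIM (what is proved, stated in full; the proofs are below) =====
def Claim_equal_is_safe_value_py : Prop := ∀ (value : String), Dom_is_safe_value_py value → Spec_is_safe_value_py value (is_safe_value_py value)

-- ===== LEMMAS AND PROOFS =====
def blockedCharList : List Char :=
  [';', '&', '`', '$', '(', ')', '{', '}', '<', '>', '\\', '\n', '\r', '\t']

-- 'c in value' for a one-character needle is character membership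
theorem isIn_singleton (c : Char) (v : String) :
    PySem.Str.isIn (String.ofList [c]) v = v.toList.contains c := by
  rw [Bool.eq_iff_iff, PySem.Str.isIn_iff_infix]
  simp [String.toList_ofList, List.singleton_infix_iff]

theorem checkA_map (cs : List Char) (v : String) :
    checkA (cs.map fun c => String.ofList [c]) v = cs.all fun c => !(v.toList.contains c) := by
  induction cs with
  | nil => rfl
  | cons c rest ih =>
    simp only [List.map_cons, checkA, isIn_singleton, List.all_cons, ih]
    cases v.toList.contains c <;> simp

-- "no blacklisted char occurs in l" read from either side
theorem all_not_contains (cs l : List Char) :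
    (cs.all fun c => !l.contains c) = !(l.any fun c => cs.contains c) := by
  rw [Bool.eq_iff_iff]
  simp only [List.all_eq_true, List.any_eq_true, Bool.not_eq_true',
    Bool.eq_false_iff, ne_eq, List.contains_iff_mem]
  constructor
  · rintro h ⟨x, hx, hcs⟩; exact (h x hcs) hx
  · intro h c hc hl; exact h ⟨c, hl, hc⟩

-- ===== VERDICT (by name: the statement is the Claim_ definition above) =====
theorem is_safe_value_py_spec : Claim_equal_is_safe_value_py := by
  intro v _
  unfold Spec_is_safe_value_py is_safe_value_py is_safe_value_py_alt
  split_ifs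
  · rfl
  · rfl
  · rw [show blockedStrsA = blockedCharList.map (fun c => String.ofList [c]) from by decide,
      checkA_map]
    simp only [show ∀ c, PySem.Set.contains blockedSetB c = blockedCharList.contains c from
      fun c => by rw [show blockedSetB = blockedCharList from by decide]; rfl]
    exact all_not_contains blockedCharList v.toList
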